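-- pv_equiv track=rewrite | github.com/glig95/pegRNA_design | design_pegrna.py | find_difference_index
-- ===== SOURCE A (Python) =====
-- def find_difference_index(str1, str2):
--     """Returns -1 if the two strings are not thee same lenght,
--     or if they are the same length but contain no differences or if they contain multiple differences
--     If they contain exactly one difference, it returns the index of that difference"""
--
--     if len(str1) != len(str2):
--         return -1  # Strings are not of equal length, cannot find difference
--
--     difference_index = None  # Index of the differing character, if any
--
--     for i in range(len(str1)):
--         if str1[i] != str2[i]:
--             if difference_index is not None:
--                 return -1  # More than one difference found, return -1
--             difference_index = i
--
--     if difference_index is None: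
--         return -1  # No difference found, return -1
--
--     return difference_index
-- ===== SOURCE B (Python) =====
-- def _diff(s1, s2, off):
--     """Divide and conquer on equal-length strings:
--     returns None if no difference, -1 if more than one, else the absolute index."""
--     if s1 == s2:
--         return None
--     if len(s1) == 1:
--         return off
--     m = len(s1) // 2
--     left = _diff(s1[:m], s2[:m], off)
--     right = _diff(s1[m:], s2[m:], off + m)
--     if left == -1 or right == -1:
--         return -1
--     if left is None:
--         return right
--     if right is None:
--         return left
--     return -1  # one difference in each half
--
--
-- def find_difference_index(str1, str2):
--     if len(str1) != len(str2):
--         return -1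
--     r = _diff(str1, str2, 0)
--     return -1 if r is None else r
-- ===== Notes on version B (the rewrite author's own statement) =====
-- stated objective: alternative
-- what changed: A does one inline linear scan with an Optional accumulator and early multi-diff return; B recursively splits the strings in half, solves each half independently, and merges the none/unique-index/multi results.
import Mathlib
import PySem

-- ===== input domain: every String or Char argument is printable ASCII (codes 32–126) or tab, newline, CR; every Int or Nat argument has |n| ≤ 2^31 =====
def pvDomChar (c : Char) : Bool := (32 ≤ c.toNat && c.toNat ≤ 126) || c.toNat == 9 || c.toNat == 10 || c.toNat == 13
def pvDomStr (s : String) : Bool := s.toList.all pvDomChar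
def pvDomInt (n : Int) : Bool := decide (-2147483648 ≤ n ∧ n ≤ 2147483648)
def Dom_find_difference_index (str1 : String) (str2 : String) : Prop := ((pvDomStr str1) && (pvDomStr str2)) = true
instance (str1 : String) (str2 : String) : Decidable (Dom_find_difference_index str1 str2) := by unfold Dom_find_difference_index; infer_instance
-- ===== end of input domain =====

-- B replaces A's inline single-pass mismatch-counting loop with a divide-and-conquer
-- recursion: split in half, solve each half, merge the none/unique-index/multi results.


-- ===== PORT A =====
-- the for-loop over range(len(str1)) with the Optional accumulator and the two early returns
def fdiLoopA : List Char → List Char → Int → Option Int → Int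
  | a :: as, b :: bs, i, acc =>
      if a ≠ b then
        match acc with
        | some _ => -1                      -- more than one difference: early return
        | none => fdiLoopA as bs (i + 1) (some i)
      else fdiLoopA as bs (i + 1) acc
  | _, _, _, acc =>
      match acc with
      | none => -1                          -- no difference found
      | some d => d

def find_difference_index (str1 : String) (str2 : String) : Int :=
  if str1.toList.length ≠ str2.toList.length then -1
  else fdiLoopA str1.toList str2.toList 0 none

-- ===== PORT B =====
-- _diff: divide and conquer; none = no difference, some (-1) = multiple, some i = unique index.
-- (Python's `len(s1) == 1` base case is widened to `≤ 1` only as a totality guard: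
-- on the equal-length inputs B is called with, length 0 always hits the s1 == s2 branch.)
def fdiRec (l1 l2 : List Char) (off : Int) : Option Int :=
  if l1 = l2 then none
  else if _h : l1.length ≤ 1 then some off
  else
    let m := l1.length / 2
    let left := fdiRec (l1.take m) (l2.take m) off
    let right := fdiRec (l1.drop m) (l2.drop m) (off + m)
    if left = some (-1) ∨ right = some (-1) then some (-1)
    else
      match left with
      | none => right
      | some i =>
          match right with
          | none => some i
          | some _ => some (-1)             -- one difference in each half
termination_by l1.length
decreasing_by
  · simp only [List.length_take]; omega
  · simp only [List.length_drop]; omega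

def find_difference_index_alt (str1 : String) (str2 : String) : Int :=
  if str1.toList.length ≠ str2.toList.length then -1
  else
    match fdiRec str1.toList str2.toList 0 with
    | none => -1
    | some r => r

-- ===== PRECONDITION & SPEC =====
def Spec_find_difference_index (str1 : String) (str2 : String) (out : Int) : Prop := out = find_difference_index_alt str1 str2
instance (str1 : String) (str2 : String) (out : Int) : Decidable (Spec_find_difference_index str1 str2 out) := by unfold Spec_find_difference_index; infer_instance

-- ===== CLAIM (what is proved, stated in full; the proofs are below) =====
def Claim_equal_find_difference_index : Prop := ∀ (str1 : String) (str2 : String), Dom_find_difference_index str1 str2 → Spec_find_difference_index str1 str2 (find_difference_index str1 str2)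

-- ===== LEMMAS AND PROOFS =====

-- absolute indices of the mismatched positions, the common yardstick for both ports
def fdiMism : List Char → List Char → Int → List Int
  | a :: as, b :: bs, i => (if a ≠ b then [i] else []) ++ fdiMism as bs (i + 1)
  | _, _, _ => []

lemma fdiMism_ge (as bs : List Char) (i j : Int) (h : j ∈ fdiMism as bs i) : i ≤ j := by
  induction as generalizing bs i with
  | nil => simp [fdiMism] at h
  | cons a as ih =>
    cases bs with
    | nil => simp [fdiMism] at h
    | cons b bs =>
      by_cases hab : a = b
      · have := ih bs (i + 1) (by simpa [fdiMism, hab] using h); omega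
      · simp [fdiMism, hab] at h
        rcases h with h | h
        · omega
        · have := ih bs (i + 1) h; omega

lemma fdiMism_nil_iff (as bs : List Char) (h : as.length = bs.length) (i : Int) :
    fdiMism as bs i = [] ↔ as = bs := by
  induction as generalizing bs i with
  | nil => cases bs with
    | nil => simp [fdiMism]
    | cons b bs => simp at h
  | cons a as ih =>
    cases bs with
    | nil => simp at h
    | cons b bs =>
      by_cases hab : a = b
      · simp [fdiMism, hab, ih bs (by simpa using h) (i + 1)]
      · simp [fdiMism, hab]

lemma fdiMism_append (x y u v : List Char) (h : x.length = u.length) (i : Int) :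
    fdiMism (x ++ y) (u ++ v) i = fdiMism x u i ++ fdiMism y v (i + x.length) := by
  induction x generalizing u i with
  | nil => cases u with
    | nil => simp [fdiMism]
    | cons _ _ => simp at h
  | cons a as ih =>
    cases u with
    | nil => simp at h
    | cons b bs =>
      simp only [List.cons_append, fdiMism, ih bs (by simpa using h) (i + 1),
        List.length_cons, List.append_assoc]
      congr 2
      push_cast
      ring_nf

-- characterisation of B's recursion by the mismatch list
lemma fdiRec_char (l1 l2 : List Char) (off : Int) (h : l1.length = l2.length)
    (hoff : 0 ≤ off) :
    fdiRec l1 l2 off =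
      match fdiMism l1 l2 off with
      | [] => none
      | [i] => some i
      | _ => some (-1) := by
  by_cases heq : l1 = l2
  · simp [fdiRec, heq, (fdiMism_nil_iff l2 l2 rfl off).2 rfl]
  · by_cases hle : l1.length ≤ 1
    · rw [fdiRec]
      simp only [heq, if_false, dif_pos hle]
      have h1 : l1.length = 1 := by
        rcases Nat.lt_or_ge l1.length 1 with h0 | h0
        · exfalso; exact heq (by
            have e1 : l1 = [] := List.length_eq_zero_iff.1 (by omega)
            have e2 : l2 = [] := List.length_eq_zero_iff.1 (by omega)
            simp_all)
        · omega
      rcases List.length_eq_one_iff.1 h1 with ⟨a, rfl⟩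
      rcases List.length_eq_one_iff.1 (h ▸ h1) with ⟨b, rfl⟩
      have hab : a ≠ b := by intro hab; exact heq (by simp [hab])
      simp [fdiMism, hab]
    · rw [fdiRec]
      simp only [heq, if_false, dif_neg hle]
      set m := l1.length / 2 with hm
      have hlt : (l1.take m).length = (l2.take m).length := by
        simp only [List.length_take]; omega
      have hld : (l1.drop m).length = (l2.drop m).length := by
        simp only [List.length_drop]; omega
      have ihl := fdiRec_char (l1.take m) (l2.take m) off hlt hoff
      have ihr := fdiRec_char (l1.drop m) (l2.drop m) (off + m) hld (by positivity)
      simp only [ihl, ihr]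
      have hsplit : fdiMism l1 l2 off
          = fdiMism (l1.take m) (l2.take m) off ++ fdiMism (l1.drop m) (l2.drop m) (off + m) := by
        have hap := fdiMism_append (l1.take m) (l1.drop m) (l2.take m) (l2.drop m) hlt off
        rw [List.take_append_drop, List.take_append_drop] at hap
        rw [hap]
        congr 2
        simp only [List.length_take]
        omega
      rw [hsplit]
      have hL : ∀ j ∈ fdiMism (l1.take m) (l2.take m) off, j ≠ -1 := by
        intro j hj; have := fdiMism_ge _ _ _ _ hj; omega
      have hR : ∀ j ∈ fdiMism (l1.drop m) (l2.drop m) (off + m), j ≠ -1 := by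
        intro j hj; have := fdiMism_ge _ _ _ _ hj; omega
      rcases hml : fdiMism (l1.take m) (l2.take m) off with _ | ⟨i, _ | ⟨j, t⟩⟩ <;>
        rcases hmr : fdiMism (l1.drop m) (l2.drop m) (off + m) with _ | ⟨i', _ | ⟨j', t'⟩⟩ <;>
        simp_all
termination_by l1.length
decreasing_by
  · simp only [List.length_take]; omega
  · simp only [List.length_drop]; omega

-- characterisations of A's loop
lemma fdiLoopA_some (as bs : List Char) (i d : Int) :
    fdiLoopA as bs i (some d) = if fdiMism as bs i = [] then d else -1 := by
  induction as generalizing bs i with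
  | nil => cases bs <;> simp [fdiLoopA, fdiMism]
  | cons a as ih =>
    cases bs with
    | nil => simp [fdiLoopA, fdiMism]
    | cons b bs =>
      by_cases hab : a = b
      · simp [fdiLoopA, fdiMism, hab, ih]
      · simp [fdiLoopA, fdiMism, hab]

lemma fdiLoopA_none (as bs : List Char) (i : Int) :
    fdiLoopA as bs i none =
      match fdiMism as bs i with
      | [] => -1
      | [d] => d
      | _ => -1 := by
  induction as generalizing bs i with
  | nil => cases bs <;> simp [fdiLoopA, fdiMism]
  | cons a as ih =>
    cases bs with
    | nil => simp [fdiLoopA, fdiMism]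
    | cons b bs =>
      by_cases hab : a = b
      · simp only [fdiLoopA, hab, ne_eq, not_true_eq_false, if_false, fdiMism,
          List.nil_append, ih]
      · simp only [fdiLoopA, hab, ne_eq, not_false_eq_true, if_true, fdiMism,
          List.singleton_append, fdiLoopA_some]
        cases fdiMism as bs (i + 1) <;> simp

-- ===== VERDICT (by name: the statement is the Claim_ definition above) =====
theorem find_difference_index_spec : Claim_equal_find_difference_index := by
  intro str1 str2 _
  unfold Spec_find_difference_index find_difference_index find_difference_index_alt
  split_ifs with hlen
  · rfl
  · rw [fdiLoopA_none, fdiRec_char _ _ _ (by omega) le_rfl]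
    cases hmm : fdiMism str1.toList str2.toList 0 with
    | nil => rfl
    | cons x xs => cases xs <;> rfl
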